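-- pv_equiv track=rewrite | github.com/Neekoras/fillr | make_icons.py | make_icon_pixels
-- ===== SOURCE A (Python) =====
-- def make_icon_pixels(size):
--     bg   = (15, 15, 15)       # #0F0F0F
--     gold = (201, 169, 110)    # #C9A96E
--
--     pixels = [bg] * (size * size)
--
--     m  = max(1, size // 6)    # margin
--     sw = max(1, size // 8)    # stroke width
--
--     # Vertical bar of "F"
--     for y in range(m, size - m):
--         for x in range(m, m + sw):
--             pixels[y * size + x] = gold
--
--     # Top horizontal bar
--     for y in range(m, m + sw):
--         for x in range(m, size - m):
--             pixels[y * size + x] = gold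
--
--     # Middle horizontal bar (slightly shorter)
--     mid_y = size // 2 - sw // 2
--     for y in range(mid_y, mid_y + sw):
--         for x in range(m, size - m - m // 2):
--             pixels[y * size + x] = gold
--
--     return pixels
-- ===== SOURCE B (Python) =====
-- def make_icon_pixels(size):
--     bg   = (15, 15, 15)
--     gold = (201, 169, 110)
--     m  = max(1, size // 6)
--     sw = max(1, size // 8)
--     mid_y = size // 2 - sw // 2
--     xv_hi = m + sw                      # right edge of the vertical bar
--     xh_hi = size - m                    # right edge of the top bar
--     xm_hi = size - m - m // 2           # right edge of the (shorter) middle bar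
--     out = []
--     for i in range(size * size):
--         y, x = divmod(i, size)
--         if (m <= x < xv_hi and m <= y < size - m) \
--            or (m <= x < xh_hi and m <= y < m + sw) \
--            or (m <= x < xm_hi and mid_y <= y < mid_y + sw):
--             out.append(gold)
--         else:
--             out.append(bg)
--     return out
-- ===== Notes on version B (the rewrite author's own statement) =====
-- stated objective: alternative
-- what changed: A allocates a background buffer and mutates it with three nested paint loops (one per bar of the F); B makes a single pass over the flat index range, recovering (y, x) by divmod and classifying each pixel by direct bar-membership tests.
import Mathlib
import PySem

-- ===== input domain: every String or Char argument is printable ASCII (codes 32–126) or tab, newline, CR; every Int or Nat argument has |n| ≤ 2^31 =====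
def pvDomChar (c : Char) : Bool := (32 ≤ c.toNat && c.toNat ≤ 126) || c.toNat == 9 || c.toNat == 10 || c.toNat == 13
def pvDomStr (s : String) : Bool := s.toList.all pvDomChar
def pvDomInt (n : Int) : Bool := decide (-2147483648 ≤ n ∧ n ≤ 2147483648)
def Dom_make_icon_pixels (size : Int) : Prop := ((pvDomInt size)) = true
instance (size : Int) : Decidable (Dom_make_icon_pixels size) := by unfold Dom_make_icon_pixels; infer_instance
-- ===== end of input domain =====

-- B replaces A's three nested paint loops over a mutable pixel buffer by a single pass over the
-- flat index range with divmod and a direct bar-membership test per pixel (objective: alternative).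

-- ===== PORT A =====
-- 'pixels[y*size+x] = gold': every assignment A actually executes has 0 ≤ y*size+x < len(pixels)
-- (implicit in the equivalence below), so '.set (…).toNat' is exact there.
def make_icon_pixels (size : Int) : List (Int × Int × Int) :=
  let bg : Int × Int × Int := (15, 15, 15)
  let gold : Int × Int × Int := (201, 169, 110)
  let pixels := List.replicate (size * size).toNat bg
  let m := max 1 (PySem.Int.floordiv size 6)
  let sw := max 1 (PySem.Int.floordiv size 8)
  -- Vertical bar of "F"
  let pixels := (PySem.List.pyRange m (size - m) 1).foldl (fun px y =>
      (PySem.List.pyRange m (m + sw) 1).foldl (fun px x =>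
        px.set (y * size + x).toNat gold) px) pixels
  -- Top horizontal bar
  let pixels := (PySem.List.pyRange m (m + sw) 1).foldl (fun px y =>
      (PySem.List.pyRange m (size - m) 1).foldl (fun px x =>
        px.set (y * size + x).toNat gold) px) pixels
  -- Middle horizontal bar (slightly shorter)
  let mid_y := PySem.Int.floordiv size 2 - PySem.Int.floordiv sw 2
  let pixels := (PySem.List.pyRange mid_y (mid_y + sw) 1).foldl (fun px y =>
      (PySem.List.pyRange m (size - m - PySem.Int.floordiv m 2) 1).foldl (fun px x =>
        px.set (y * size + x).toNat gold) px) pixels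
  pixels

-- ===== PORT B =====
-- the 'none' branch of divmod? (size = 0) is unreachable: the index range is then empty.
def make_icon_pixels_alt (size : Int) : List (Int × Int × Int) :=
  let bg : Int × Int × Int := (15, 15, 15)
  let gold : Int × Int × Int := (201, 169, 110)
  let m := max 1 (PySem.Int.floordiv size 6)
  let sw := max 1 (PySem.Int.floordiv size 8)
  let mid_y := PySem.Int.floordiv size 2 - PySem.Int.floordiv sw 2
  let xv_hi := m + sw
  let xh_hi := size - m
  let xm_hi := size - m - PySem.Int.floordiv m 2
  (PySem.List.pyRange 0 (size * size) 1).map (fun i =>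
    match PySem.Int.divmod? i size with
    | none => bg
    | some (y, x) =>
      if (m ≤ x ∧ x < xv_hi ∧ m ≤ y ∧ y < size - m)
        ∨ (m ≤ x ∧ x < xh_hi ∧ m ≤ y ∧ y < m + sw)
        ∨ (m ≤ x ∧ x < xm_hi ∧ mid_y ≤ y ∧ y < mid_y + sw)
      then gold else bg)

-- ===== PRECONDITION & SPEC =====
def Spec_make_icon_pixels (size : Int) (out : List (Int × Int × Int)) : Prop := out = make_icon_pixels_alt size
instance (size : Int) (out : List (Int × Int × Int)) : Decidable (Spec_make_icon_pixels size out) := by unfold Spec_make_icon_pixels; infer_instance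

-- ===== CLAIM (what is proved, stated in full; the proofs are below) =====
def Claim_equal_make_icon_pixels : Prop := ∀ (size : Int), Dom_make_icon_pixels size → Spec_make_icon_pixels size (make_icon_pixels size)

-- ===== LEMMAS AND PROOFS =====

-- one inner paint loop: length is preserved …
theorem pv_foldl_set_length {α : Type} (v : α) (f : Int → Nat) (xs : List Int) :
    ∀ (px : List α), (xs.foldl (fun px x => px.set (f x) v) px).length = px.length := by
  induction xs with
  | nil => intro px; rfl
  | cons x t ih => intro px; simp [ih]

-- … and the result at index j is v where some painted index hits j (and j is in range), else unchanged
theorem pv_foldl_set_getElem? {α : Type} (v : α) (f : Int → Nat) (xs : List Int) :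
    ∀ (px : List α) (j : Nat), (xs.foldl (fun px x => px.set (f x) v) px)[j]? =
      if (∃ x ∈ xs, f x = j) ∧ j < px.length then some v else px[j]? := by
  induction xs with
  | nil => intro px j; simp
  | cons x t ih =>
    intro px j
    rw [List.foldl_cons, ih, List.length_set, List.getElem?_set]
    by_cases ht : (∃ x' ∈ t, f x' = j) ∧ j < px.length
    · rw [if_pos ht,
        if_pos ⟨⟨ht.1.choose, List.mem_cons_of_mem _ ht.1.choose_spec.1, ht.1.choose_spec.2⟩, ht.2⟩]
    · rw [if_neg ht]
      by_cases hfx : f x = j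
      · rw [if_pos hfx, hfx]
        by_cases hlen : j < px.length
        · rw [if_pos hlen, if_pos ⟨⟨x, List.mem_cons_self .., hfx⟩, hlen⟩]
        · rw [if_neg hlen, if_neg (fun h => hlen h.2), List.getElem?_eq_none (by omega)]
      · rw [if_neg hfx]
        have hno : ¬((∃ x' ∈ x :: t, f x' = j) ∧ j < px.length) := by
          rintro ⟨⟨x', hx', hf⟩, hlen⟩
          rcases List.mem_cons.mp hx' with h | h
          · exact hfx (h ▸ hf)
          · exact ht ⟨⟨x', h, hf⟩, hlen⟩
        rw [if_neg hno]

-- the double paint loop, same shape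
theorem pv_foldl_set2_getElem? {α : Type} (v : α) (g : Int → Int → Nat) (xs : List Int) (ys : List Int) :
    ∀ (px : List α) (j : Nat),
      (ys.foldl (fun px y => xs.foldl (fun px x => px.set (g y x) v) px) px)[j]? =
      if (∃ y ∈ ys, ∃ x ∈ xs, g y x = j) ∧ j < px.length then some v else px[j]? := by
  induction ys with
  | nil => intro px j; simp
  | cons y t ih =>
    intro px j
    rw [List.foldl_cons, ih, pv_foldl_set_length v (fun x => g y x) xs,
      pv_foldl_set_getElem? v (fun x => g y x) xs]
    by_cases ht : (∃ y' ∈ t, ∃ x ∈ xs, g y' x = j) ∧ j < px.length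
    · rw [if_pos ht,
        if_pos ⟨⟨ht.1.choose, List.mem_cons_of_mem _ ht.1.choose_spec.1, ht.1.choose_spec.2⟩, ht.2⟩]
    · rw [if_neg ht]
      by_cases hx : (∃ x ∈ xs, g y x = j) ∧ j < px.length
      · rw [if_pos hx, if_pos ⟨⟨y, List.mem_cons_self .., hx.1⟩, hx.2⟩]
      · rw [if_neg hx]
        have hno : ¬((∃ y' ∈ y :: t, ∃ x ∈ xs, g y' x = j) ∧ j < px.length) := by
          rintro ⟨⟨y', hy', hrest⟩, hlen⟩
          rcases List.mem_cons.mp hy' with h | h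
          · exact hx ⟨h ▸ hrest, hlen⟩
          · exact ht ⟨⟨y', h, hrest⟩, hlen⟩
        rw [if_neg hno]

theorem pv_foldl_set2_length {α : Type} (v : α) (g : Int → Int → Nat) (xs ys : List Int) :
    ∀ (px : List α),
      (ys.foldl (fun px y => xs.foldl (fun px x => px.set (g y x) v) px) px).length = px.length := by
  induction ys with
  | nil => intro px; rfl
  | cons y t ih => intro px; rw [List.foldl_cons, ih, pv_foldl_set_length v (fun x => g y x) xs]

-- bar membership: for 0 < size, 'j = y*size+x with y ∈ [a,b), x ∈ [c,d)' is exactly the divmod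
-- condition, provided the x-interval sits inside [0, size)
theorem pv_decomp_iff (size a b c d : Int) (hs : 0 < size) (ha : 0 ≤ a) (hc : 0 ≤ c)
    (hd : d ≤ size) (j : Nat) :
    ((∃ y ∈ PySem.List.pyRange a b 1, ∃ x ∈ PySem.List.pyRange c d 1, (y * size + x).toNat = j) ↔
      (c ≤ PySem.Int.mod (j : Int) size ∧ PySem.Int.mod (j : Int) size < d ∧
       a ≤ PySem.Int.floordiv (j : Int) size ∧ PySem.Int.floordiv (j : Int) size < b)) := by
  rw [PySem.Int.mod_eq_emod_of_pos hs, PySem.Int.floordiv_eq_ediv_of_pos hs]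
  simp only [PySem.List.mem_pyRange_one]
  constructor
  · rintro ⟨y, ⟨hay, hyb⟩, x, ⟨hcx, hxd⟩, hje⟩
    have hx0 : 0 ≤ x := le_trans hc hcx
    have hy0 : 0 ≤ y := le_trans ha hay
    have hpos : 0 ≤ y * size + x := add_nonneg (mul_nonneg hy0 hs.le) hx0
    have hj : x + y * size = (j : Int) := by omega
    have hmod : (j : Int) % size = x := by
      rw [← hj, Int.add_mul_emod_self_right, Int.emod_eq_of_lt hx0 (lt_of_lt_of_le hxd hd)]
    have hdiv : (j : Int) / size = y := by
      rw [← hj, Int.add_mul_ediv_right _ _ hs.ne',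
        Int.ediv_eq_zero_of_lt hx0 (lt_of_lt_of_le hxd hd), zero_add]
    omega
  · rintro ⟨h1, h2, h3, h4⟩
    refine ⟨(j : Int) / size, ⟨h3, h4⟩, (j : Int) % size, ⟨h1, h2⟩, ?_⟩
    have h5 : size * ((j : Int) / size) + (j : Int) % size = (j : Int) :=
      Int.mul_ediv_add_emod (j : Int) size
    have h6 : (j : Int) / size * size = size * ((j : Int) / size) := mul_comm _ _
    omega

-- folding a chain of ifs painting the same value into one disjunction
theorem pv_if_chain {α : Type} (p q r : Prop) [Decidable p] [Decidable q] [Decidable r] (g b : α) :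
    (if r then some g else if q then some g else if p then some g else some b) =
      some (if p ∨ q ∨ r then g else b) := by
  by_cases hp : p <;> by_cases hq : q <;> by_cases hr : r <;> simp [hp, hq, hr]

-- ===== VERDICT (by name: the statement is the Claim_ definition above) =====
theorem make_icon_pixels_spec : Claim_equal_make_icon_pixels := by
  intro size _
  unfold Spec_make_icon_pixels make_icon_pixels make_icon_pixels_alt
  apply List.ext_getElem?
  intro j
  set m := max 1 (PySem.Int.floordiv size 6) with hm
  set sw := max 1 (PySem.Int.floordiv size 8) with hsw
  have hm1 : 1 ≤ m := le_max_left _ _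
  have hsw1 : 1 ≤ sw := le_max_left _ _
  have hfd2 : PySem.Int.floordiv m 2 = m / 2 :=
    PySem.Int.floordiv_eq_ediv_of_pos (by norm_num)
  have hfd2' : 0 ≤ PySem.Int.floordiv m 2 := by
    rw [hfd2]; exact Int.ediv_nonneg (by omega) (by norm_num)
  rw [pv_foldl_set2_getElem?, pv_foldl_set2_getElem?, pv_foldl_set2_getElem?]
  simp only [pv_foldl_set2_length, List.length_replicate, List.getElem?_map,
    PySem.List.getElem?_pyRange_one, sub_zero, zero_add]
  by_cases hj : j < (size * size).toNat
  · have hsz : size ≠ 0 := by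
      intro h; rw [h] at hj; simp at hj
    rw [if_pos hj, List.getElem?_replicate, if_pos hj]
    simp only [hj, and_true, Option.map_some]
    simp only [PySem.Int.divmod?, if_neg hsz]
    rw [show ((j : Int)).fmod size = PySem.Int.mod (j : Int) size from rfl,
      show ((j : Int)).fdiv size = PySem.Int.floordiv (j : Int) size from rfl]
    rcases lt_trichotomy size 0 with hneg | h0 | hpos
    · -- size < 0 : every bar is empty and every divmod condition fails (x-part ≤ 0 < m)
      have hxm : PySem.Int.mod (j : Int) size ≤ 0 := (PySem.Int.mod_neg_bounds _ hneg).2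
      have e1 : ¬(∃ y ∈ PySem.List.pyRange m (size - m) 1,
          ∃ x ∈ PySem.List.pyRange m (m + sw) 1, (y * size + x).toNat = j) := by
        rintro ⟨y, hy, -⟩; rw [PySem.List.mem_pyRange_one] at hy; omega
      have e2 : ¬(∃ y ∈ PySem.List.pyRange m (m + sw) 1,
          ∃ x ∈ PySem.List.pyRange m (size - m) 1, (y * size + x).toNat = j) := by
        rintro ⟨y, -, x, hx, -⟩; rw [PySem.List.mem_pyRange_one] at hx; omega
      have e3 : ¬(∃ y ∈ PySem.List.pyRange (PySem.Int.floordiv size 2 - PySem.Int.floordiv sw 2)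
            (PySem.Int.floordiv size 2 - PySem.Int.floordiv sw 2 + sw) 1,
          ∃ x ∈ PySem.List.pyRange m (size - m - PySem.Int.floordiv m 2) 1,
            (y * size + x).toNat = j) := by
        rintro ⟨y, -, x, hx, -⟩; rw [PySem.List.mem_pyRange_one] at hx; omega
      rw [if_neg e3, if_neg e2, if_neg e1, if_neg (by
        rintro (⟨h, -⟩ | ⟨h, -⟩ | ⟨h, -⟩) <;> omega)]
    · exact absurd h0 hsz
    · -- size > 0 : each bar's ∃-form is the corresponding divmod condition
      have hm' : m = max 1 (size / 6) := by
        rw [hm, PySem.Int.floordiv_eq_ediv_of_pos (show (0:Int) < 6 by norm_num)]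
      have hsw' : sw = max 1 (size / 8) := by
        rw [hsw, PySem.Int.floordiv_eq_ediv_of_pos (show (0:Int) < 8 by norm_num)]
      have hmc := max_choice 1 (size / 6)
      rw [← hm'] at hmc
      have hswc := max_choice 1 (size / 8)
      rw [← hsw'] at hswc
      have hs2 : PySem.Int.floordiv size 2 = size / 2 :=
        PySem.Int.floordiv_eq_ediv_of_pos (by norm_num)
      have hsw2 : PySem.Int.floordiv sw 2 = sw / 2 :=
        PySem.Int.floordiv_eq_ediv_of_pos (by norm_num)
      have hmid0 : 0 ≤ PySem.Int.floordiv size 2 - PySem.Int.floordiv sw 2 := by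
        rcases hswc with h | h <;> omega
      have e2 : (∃ y ∈ PySem.List.pyRange m (m + sw) 1,
          ∃ x ∈ PySem.List.pyRange m (size - m) 1, (y * size + x).toNat = j) ↔
          (m ≤ PySem.Int.mod (j : Int) size ∧ PySem.Int.mod (j : Int) size < size - m ∧
           m ≤ PySem.Int.floordiv (j : Int) size ∧ PySem.Int.floordiv (j : Int) size < m + sw) :=
        pv_decomp_iff size m (m + sw) m (size - m) hpos (by omega) (by omega) (by omega) j
      have e3 : (∃ y ∈ PySem.List.pyRange (PySem.Int.floordiv size 2 - PySem.Int.floordiv sw 2)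
            (PySem.Int.floordiv size 2 - PySem.Int.floordiv sw 2 + sw) 1,
          ∃ x ∈ PySem.List.pyRange m (size - m - PySem.Int.floordiv m 2) 1,
            (y * size + x).toNat = j) ↔
          (m ≤ PySem.Int.mod (j : Int) size ∧
           PySem.Int.mod (j : Int) size < size - m - PySem.Int.floordiv m 2 ∧
           PySem.Int.floordiv size 2 - PySem.Int.floordiv sw 2 ≤ PySem.Int.floordiv (j : Int) size ∧
           PySem.Int.floordiv (j : Int) size <
             PySem.Int.floordiv size 2 - PySem.Int.floordiv sw 2 + sw) :=
        pv_decomp_iff size (PySem.Int.floordiv size 2 - PySem.Int.floordiv sw 2)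
          (PySem.Int.floordiv size 2 - PySem.Int.floordiv sw 2 + sw) m
          (size - m - PySem.Int.floordiv m 2) hpos hmid0 (by omega) (by omega) j
      have e1 : (∃ y ∈ PySem.List.pyRange m (size - m) 1,
          ∃ x ∈ PySem.List.pyRange m (m + sw) 1, (y * size + x).toNat = j) ↔
          (m ≤ PySem.Int.mod (j : Int) size ∧ PySem.Int.mod (j : Int) size < m + sw ∧
           m ≤ PySem.Int.floordiv (j : Int) size ∧ PySem.Int.floordiv (j : Int) size < size - m) := by
        by_cases hv : m < size - m
        · have hbound : m + sw ≤ size := by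
            rcases hmc with h | h <;> rcases hswc with h' | h' <;> omega
          exact pv_decomp_iff size m (size - m) m (m + sw) hpos (by omega) (by omega) hbound j
        · rw [PySem.List.pyRange_one_eq_nil (show size - m ≤ m by omega)]
          simp only [List.not_mem_nil]
          constructor
          · rintro ⟨y, hy, -⟩; exact hy.elim
          · rintro ⟨-, -, h3, h4⟩; omega
      simp only [e1, e2, e3]
      exact pv_if_chain _ _ _ _ _
  · simp [hj]
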